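-- pv_equiv track=rewrite | github.com/IBBD/short-text-svm | config.py | findSecondVal
-- ===== SOURCE A (Python) =====
-- def findSecondVal(data, notKey):
--     """
--     找到字典中除了某个key之外的最大值
--     """
--     val = 0
--     ret_key = ""
--     for key in data:
--         if data[key] > val and key != notKey:
--             val = data[key]
--             ret_key = key
--
--     return ret_key, val
-- ===== SOURCE B (Python) =====
-- def findSecondVal(data, notKey):
--     """
--     Two-pass: first compute the maximum value among entries whose key is not
--     notKey, then return the first entry attaining it (if positive).
--     """
--     m = max((v for k, v in data.items() if k != notKey), default=0)
--     if m > 0: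
--         for k, v in data.items():
--             if k != notKey and v == m:
--                 return k, m
--     return "", 0
-- ===== Notes on version B (the rewrite author's own statement) =====
-- stated objective: alternative
-- what changed: Replaces A's single running-max fold (mutable val/ret_key accumulator with strict-> updates) by a two-pass formulation: a max() over the eligible values followed by a scan for the first entry attaining that maximum.
import Mathlib
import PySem

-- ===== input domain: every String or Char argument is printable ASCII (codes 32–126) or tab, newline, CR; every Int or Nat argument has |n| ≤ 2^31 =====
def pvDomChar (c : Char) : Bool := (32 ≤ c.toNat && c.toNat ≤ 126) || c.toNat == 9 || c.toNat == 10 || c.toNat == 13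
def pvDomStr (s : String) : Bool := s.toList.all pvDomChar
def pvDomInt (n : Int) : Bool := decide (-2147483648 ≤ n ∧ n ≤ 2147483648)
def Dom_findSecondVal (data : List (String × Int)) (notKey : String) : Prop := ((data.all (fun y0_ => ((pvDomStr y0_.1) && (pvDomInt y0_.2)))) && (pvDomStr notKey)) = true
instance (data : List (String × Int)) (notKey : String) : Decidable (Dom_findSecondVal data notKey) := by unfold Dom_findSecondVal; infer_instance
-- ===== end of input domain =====

-- B replaces A's single running-max fold by a two-pass max()-then-find scan (alternative decomposition, same cost).

-- ===== PORT A =====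
-- loop body of `for key in data: if data[key] > val and key != notKey: …`
-- (state is (val, ret_key); keys of the dict are distinct by Pre_, so the
-- value looked up by data[key] is the entry's own second component)
def stepA (notKey : String) (s : Int × String) (kv : String × Int) : Int × String :=
  if kv.2 > s.1 && kv.1 != notKey then (kv.2, kv.1) else s

def findSecondVal (data : List (String × Int)) (notKey : String) : String × Int :=
  let s := data.foldl (stepA notKey) (0, "")
  (s.2, s.1)

-- ===== PORT B =====
def findSecondVal_alt (data : List (String × Int)) (notKey : String) : String × Int :=
  let vals := (data.filter (fun kv => kv.1 != notKey)).map Prod.snd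
  let m := (PySem.List.max? vals (fun y => y)).getD 0   -- max(..., default=0)
  if 0 < m then
    match data.find? (fun kv => kv.1 != notKey && kv.2 == m) with
    | some kv => (kv.1, m)
    | none => ("", 0)
  else ("", 0)

-- ===== PRECONDITION & SPEC =====
-- The association list represents a Python dict, whose keys are necessarily distinct.
def Pre_findSecondVal (data : List (String × Int)) (notKey : String) : Prop :=
  (data.map Prod.fst).Nodup
instance (data : List (String × Int)) (notKey : String) : Decidable (Pre_findSecondVal data notKey) := by unfold Pre_findSecondVal; infer_instance

def pvWitness_findSecondVal : (List (String × Int)) × String := ([("a", 3), ("b", 5), ("c", 5)], "b")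

def Spec_findSecondVal (data : List (String × Int)) (notKey : String) (out : String × Int) : Prop := out = findSecondVal_alt data notKey
instance (data : List (String × Int)) (notKey : String) (out : String × Int) : Decidable (Spec_findSecondVal data notKey out) := by unfold Spec_findSecondVal; infer_instance

-- ===== CLAIM (what is proved, stated in full; the proofs are below) =====
def Claim_equal_findSecondVal : Prop := ∀ (data : List (String × Int)) (notKey : String), Dom_findSecondVal data notKey → Pre_findSecondVal data notKey → Spec_findSecondVal data notKey (findSecondVal data notKey)

-- ===== LEMMAS AND PROOFS =====

-- the eligible values of l
def eligVals (notKey : String) (l : List (String × Int)) : List Int :=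
  (l.filter (fun kv => kv.1 != notKey)).map Prod.snd

-- the maximum of eligVals is attained by some entry that find? locates
lemma attain (notKey : String) (l : List (String × Int)) (M : Int)
    (h : PySem.List.max? (eligVals notKey l) (fun y => y) = some M) :
    ∃ kv, l.find? (fun kv => kv.1 != notKey && kv.2 == M) = some kv := by
  have hm : M ∈ eligVals notKey l := PySem.List.max?_mem h
  unfold eligVals at hm
  rw [List.mem_map] at hm
  obtain ⟨kv, hkv, hval⟩ := hm
  rw [List.mem_filter] at hkv
  have : (l.find? (fun kv => kv.1 != notKey && kv.2 == M)).isSome := by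
    rw [List.find?_isSome]
    exact ⟨kv, hkv.1, by simp [hkv.2, hval]⟩
  exact Option.isSome_iff_exists.mp this

-- characterisation of A's fold from an arbitrary accumulator
lemma foldA_char (notKey : String) (l : List (String × Int)) :
    ∀ (v : Int) (k : String),
    l.foldl (stepA notKey) (v, k) =
      match PySem.List.max? (eligVals notKey l) (fun y => y) with
      | none => (v, k)
      | some M =>
        if v < M then
          match l.find? (fun kv => kv.1 != notKey && kv.2 == M) with
          | some kv => (M, kv.1)
          | none => (v, k)
        else (v, k) := by
  induction l with
  | nil => intro v k; simp [eligVals, PySem.List.max?]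
  | cons kv l ih =>
    intro v k
    by_cases he : kv.1 != notKey
    · -- eligible entry
      have hev : eligVals notKey (kv :: l) = kv.2 :: eligVals notKey l := by
        simp [eligVals, he]
      rw [List.foldl_cons, hev, PySem.List.max?_id_cons]
      cases hMo : PySem.List.max? (eligVals notKey l) (fun y => y) with
      | none =>
        -- no eligible entry in l
        have hnil : eligVals notKey l = [] :=
          (PySem.List.max?_eq_none_iff _ _).mp hMo
        rw [hnil]
        simp only [List.foldl_nil]
        by_cases hv : v < kv.2
        · simp only [stepA, he, Bool.and_true]
          rw [if_pos (by simpa using hv)]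
          rw [ih kv.2 kv.1, hMo]
          dsimp only
          rw [if_pos hv]
          rw [List.find?_cons_of_pos (by simp [he])]
        · simp only [stepA, he, Bool.and_true]
          rw [if_neg (by simpa using hv)]
          rw [ih v k, hMo]
          dsimp only
          rw [if_neg hv]
      | some M =>
        -- M is the max of the eligible values of l
        obtain ⟨a, t, hcons⟩ : ∃ a t, eligVals notKey l = a :: t := by
          rcases heq : eligVals notKey l with _ | ⟨a, t⟩
          · rw [heq] at hMo; simp [PySem.List.max?] at hMo
          · exact ⟨a, t, rfl⟩
        have hfold : (eligVals notKey l).foldl max kv.2 = max kv.2 M := by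
          rw [hcons, PySem.List.max?_id_cons] at hMo
          have hM : t.foldl max a = M := by injection hMo
          rw [hcons, List.foldl_cons, ← hM, List.foldl_assoc]
        rw [hfold]
        obtain ⟨kvf, hfind⟩ := attain notKey l M hMo
        by_cases hv : v < kv.2
        · simp only [stepA, he, Bool.and_true]
          rw [if_pos (by simpa using hv)]
          rw [ih kv.2 kv.1, hMo]
          dsimp only
          by_cases h2 : kv.2 < M
          · rw [if_pos h2, hfind]
            have hmax : max kv.2 M = M := by omega
            rw [hmax, if_pos (by omega)]
            rw [List.find?_cons_of_neg (by simp [he]; omega), hfind]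
          · rw [if_neg h2]
            have hmax : max kv.2 M = kv.2 := by omega
            rw [hmax, if_pos hv]
            rw [List.find?_cons_of_pos (by simp [he])]
        · simp only [stepA, he, Bool.and_true]
          rw [if_neg (by simpa using hv)]
          rw [ih v k, hMo]
          dsimp only
          by_cases h2 : v < M
          · rw [if_pos h2, hfind]
            have hmax : max kv.2 M = M := by omega
            rw [hmax, if_pos h2]
            rw [List.find?_cons_of_neg (by simp [he]; omega), hfind]
          · rw [if_neg h2]
            rw [if_neg (by omega : ¬ v < max kv.2 M)]
    · -- ineligible entry: skipped by both sides
      have he' : (kv.1 != notKey) = false := by simpa using he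
      have hev : eligVals notKey (kv :: l) = eligVals notKey l := by
        simp [eligVals, he']
      have hstep : stepA notKey (v, k) kv = (v, k) := by
        simp [stepA, he']
      rw [List.foldl_cons, hstep, hev, ih v k]
      cases hMo : PySem.List.max? (eligVals notKey l) (fun y => y) with
      | none => rfl
      | some M =>
        dsimp only
        rw [List.find?_cons_of_neg (by simp [he'])]

-- ===== VERDICT (by name: the statement is the Claim_ definition above) =====
theorem findSecondVal_spec : Claim_equal_findSecondVal := by
  intro data notKey _ _
  unfold Spec_findSecondVal findSecondVal findSecondVal_alt
  rw [show ((data.filter (fun kv => kv.1 != notKey)).map Prod.snd) = eligVals notKey data from rfl]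
  rw [foldA_char notKey data 0 ""]
  cases hMo : PySem.List.max? (eligVals notKey data) (fun y => y) with
  | none => simp [hMo]
  | some M =>
    simp only [hMo, Option.getD_some]
    by_cases h : (0 : Int) < M
    · rw [if_pos h, if_pos h]
      obtain ⟨kvf, hfind⟩ := attain notKey data M hMo
      rw [hfind]
    · rw [if_neg h, if_neg h]
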